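-- pv_equiv track=rewrite | github.com/aluhmann1/BIS-346-446-luhmannandrew | Exercise_5.11.py | summarize_letters
-- ===== SOURCE A (Python) =====
-- ALPHABET = 'abcdefghijklmnopqrstuvwxyz'
--
-- def summarize_letters(string):
--     letters = []
--     counts = []
--
--     for letter in string.lower():
--         if letter in ALPHABET:
--             if letter in letters:
--                 index = letters.index(letter)
--                 counts[index] += 1
--             else:
--                 letters.append(letter)
--                 counts.append(1)
--
--     tuples = list(zip(letters, counts))
--     tuples.sort()
--     return tuples
-- ===== SOURCE B (Python) =====
-- ALPHABET = 'abcdefghijklmnopqrstuvwxyz'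
--
-- def summarize_letters(string):
--     lowered = string.lower()
--     result = []
--     for c in ALPHABET:
--         cnt = lowered.count(c)
--         if cnt > 0:
--             result.append((c, cnt))
--     return result
-- ===== Notes on version B (the rewrite author's own statement) =====
-- stated objective: simpler
-- what changed: Instead of building parallel letters/counts lists with a membership test and list.index per character and sorting at the end, B lowercases once and scans the fixed alphabet in order, emitting (c, lowered.count(c)) for letters that occur, so no per-character index bookkeeping and no sort is needed.
import Mathlib
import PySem

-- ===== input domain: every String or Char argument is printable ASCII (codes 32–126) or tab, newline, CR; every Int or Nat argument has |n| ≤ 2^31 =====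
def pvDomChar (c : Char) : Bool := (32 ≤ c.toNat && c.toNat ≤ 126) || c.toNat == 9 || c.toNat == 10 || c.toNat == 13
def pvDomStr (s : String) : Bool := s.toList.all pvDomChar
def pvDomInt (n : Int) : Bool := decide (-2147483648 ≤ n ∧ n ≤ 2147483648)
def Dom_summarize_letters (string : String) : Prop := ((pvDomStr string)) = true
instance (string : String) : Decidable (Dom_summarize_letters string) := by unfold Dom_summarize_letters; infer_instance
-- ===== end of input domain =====

-- B replaces A's parallel letters/counts lists (membership test + list.index per character, sort at the end)
-- by one scan of the fixed alphabet in order, emitting (c, lowered.count(c)) when positive; no index bookkeeping, no sort.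

def pvALPHABET : String := "abcdefghijklmnopqrstuvwxyz"

-- ===== PORT A =====
-- iterating a Python str yields 1-char strings; ported as the chars of (string.lower()),
-- turned back into singleton Strings where A zips the tuples (exact on every input).
-- 'letter in ALPHABET' is Python's substring test, exact for the 1-char letter.
def summarize_letters (string : String) : List (String × Int) :=
  let st := (PySem.Str.lower string).toList.foldl
    (fun (st : List Char × List Int) letter =>
      if PySem.Str.isIn (String.singleton letter) pvALPHABET then
        if letter ∈ st.1 then
          let index : Nat := (PySem.List.index? st.1 letter).getD 0
          (st.1, PySem.List.pySetD st.2 (index : Int) (PySem.List.pyGetD st.2 (index : Int) 0 + 1))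
        else
          (st.1 ++ [letter], st.2 ++ [1])
      else st) ([], [])
  let tuples := (st.1.zip st.2).map (fun p => (String.singleton p.1, p.2))
  PySem.List.sorted2 tuples (fun t => t.1) (fun t => t.2)

-- ===== PORT B =====
def summarize_letters_alt (string : String) : List (String × Int) :=
  let lowered := PySem.Str.lower string
  pvALPHABET.toList.foldl
    (fun acc c =>
      let cnt : Int := (PySem.Str.count lowered (String.singleton c) : Int)
      if 0 < cnt then acc ++ [(String.singleton c, cnt)] else acc) []

-- ===== PRECONDITION & SPEC =====
def Spec_summarize_letters (string : String) (out : List (String × Int)) : Prop := out = summarize_letters_alt string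
instance (string : String) (out : List (String × Int)) : Decidable (Spec_summarize_letters string out) := by unfold Spec_summarize_letters; infer_instance

-- ===== CLAIM (what is proved, stated in full; the proofs are below) =====
def Claim_equal_summarize_letters : Prop := ∀ (string : String), Dom_summarize_letters string → Spec_summarize_letters string (summarize_letters string)

-- ===== LEMMAS AND PROOFS =====

theorem pv_singleton_infix_iff (c : Char) (l : List Char) : ([c] <:+: l) ↔ c ∈ l := by
  constructor
  · intro h; exact h.mem (by simp)
  · intro h; obtain ⟨s, t, rfl⟩ := List.mem_iff_append.mp h
    exact ⟨s, t, by simp⟩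

theorem pv_isIn_singleton (c : Char) (s : String) :
    PySem.Str.isIn (String.singleton c) s = true ↔ c ∈ s.toList := by
  rw [PySem.Str.isIn_iff_infix]
  simpa using pv_singleton_infix_iff c s.toList

theorem pv_count_go_singleton (c : Char) :
    ∀ (l : List Char) (fuel acc : Nat), l.length ≤ fuel →
      PySem.Chars.count.go [c] fuel l acc = acc + l.count c := by
  intro l
  induction l with
  | nil => intro fuel acc _; cases fuel <;> simp [PySem.Chars.count.go]
  | cons h t ih =>
      intro fuel acc hle
      cases fuel with
      | zero => simp at hle
      | succ n =>
          by_cases hch : c = h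
          · subst hch
            simp only [PySem.Chars.count.go, List.isPrefixOf, BEq.rfl, Bool.true_and,
              List.isPrefixOf_nil_left, if_true, List.length_singleton, List.drop_one,
              List.tail_cons]
            rw [ih n (acc + 1) (by simpa using hle)]
            simp [List.count_cons]
            omega
          · have : ([c].isPrefixOf (h :: t)) = false := by
              simp [List.isPrefixOf]
              exact fun hh => hch (by simpa using hh)
            simp only [PySem.Chars.count.go, this, if_false]
            rw [ih n acc (by simpa using hle)]
            simp [List.count_cons, Ne.symm hch, hch]

theorem pv_count_singleton (s : List Char) (c : Char) :
    PySem.Chars.count s [c] = s.count c := by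
  rw [PySem.Chars.count]
  rw [if_neg (by simp)]
  simpa using pv_count_go_singleton c s s.length 0 (le_refl _)

-- the simplified body of A's loop (membership/index bookkeeping written with List primitives)
def pvStep (st : List Char × List Int) (c : Char) : List Char × List Int :=
  if c ∈ st.1 then
    (st.1, st.2.set (st.1.idxOf c) (st.2.getD (st.1.idxOf c) 0 + 1))
  else (st.1 ++ [c], st.2 ++ [1])

theorem pv_idxOf?_getD (l : List Char) (c : Char) (h : c ∈ l) :
    (List.idxOf? c l).getD 0 = l.idxOf c := by
  induction l with
  | nil => simp at h
  | cons x xs ih =>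
      by_cases hx : x = c
      · subst hx; simp [List.idxOf?_cons]
      · have hc : c ∈ xs := by
          rcases List.mem_cons.mp h with h' | h'
          · exact absurd h'.symm hx
          · exact h'
        have hs : (List.idxOf? c xs).isSome := List.isSome_idxOf?.mpr hc
        rcases Option.isSome_iff_exists.mp hs with ⟨k, hk⟩
        have hik := ih hc
        rw [hk] at hik
        simp only [Option.getD_some] at hik
        rw [List.idxOf?_cons, List.idxOf_cons_ne _ (by simpa using hx)]
        simp [hx, hk, hik]

theorem pv_map_getD (g : Char → Int) (l : List Char) (c : Char) (h : c ∈ l) :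
    (l.map g).getD (l.idxOf c) 0 = g c := by
  have hlt : l.idxOf c < l.length := List.idxOf_lt_length_of_mem h
  rw [List.getD_eq_getElem _ _ (by simpa using hlt)]
  simp [List.getElem_idxOf hlt]

theorem pv_map_set (g : Char → Int) :
    ∀ (l : List Char), l.Nodup → ∀ c ∈ l,
      (l.map g).set (l.idxOf c) (g c + 1) = l.map (fun a => if a = c then g a + 1 else g a) := by
  intro l
  induction l with
  | nil => intro _ c hc; simp at hc
  | cons x xs ih =>
      intro hnd c hc
      by_cases hx : x = c
      · subst hx
        have hnotin : x ∉ xs := (List.nodup_cons.mp hnd).1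
        simp only [List.idxOf_cons_self, List.map_cons, List.set_cons_zero]
        congr 1
        refine (List.map_congr_left ?_).symm
        intro a ha
        have : a ≠ x := fun h => hnotin (h ▸ ha)
        simp [this]
      · have hc' : c ∈ xs := by
          rcases List.mem_cons.mp hc with h' | h'
          · exact absurd h'.symm hx
          · exact h'
        rw [List.idxOf_cons_ne _ (by simpa using hx)]
        simp only [List.map_cons, List.set_cons_succ, if_neg hx]
        congr 1
        exact ih (List.nodup_cons.mp hnd).2 c hc'

theorem pv_loop (m : List Char) :
    m.foldl pvStep ([], []) =
      (PySem.Set.ofList m, (PySem.Set.ofList m).map (fun a => (m.count a : Int))) := by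
  induction m using List.reverseRecOn with
  | nil => simp [PySem.Set.ofList]
  | append_singleton m c ih =>
      rw [List.foldl_append, List.foldl_cons, List.foldl_nil, ih,
        PySem.Set.ofList_append_singleton]
      have hnd : (PySem.Set.ofList m).Nodup := PySem.Set.nodup_ofList m
      by_cases hm : c ∈ PySem.Set.ofList m
      · have hmem : c ∈ m := (PySem.Set.mem_ofList _ _).mp hm
        have hadd : (PySem.Set.ofList m).add c = PySem.Set.ofList m := by
          simp [PySem.Set.add, List.elem_eq_contains.symm, hm]
        rw [hadd]
        simp only [pvStep, if_pos hm]
        rw [pv_map_getD _ _ _ hm, pv_map_set _ _ hnd _ hm]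
        simp only [Prod.mk.injEq, true_and]
        apply List.map_congr_left
        intro a _
        by_cases hac : a = c
        · subst hac; simp [List.count_append]
        · simp [hac, Ne.symm hac, List.count_append]
      · have hmem : c ∉ m := fun h => hm ((PySem.Set.mem_ofList _ _).mpr h)
        have hadd : (PySem.Set.ofList m).add c = PySem.Set.ofList m ++ [c] := by
          simp [PySem.Set.add, List.elem_eq_contains.symm, hm]
        rw [hadd]
        simp only [pvStep, if_neg hm]
        simp only [Prod.mk.injEq, true_and]
        rw [List.map_append]
        congr 1
        · apply List.map_congr_left
          intro a ha
          have hac : a ≠ c := fun h => hm (h ▸ ha)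
          simp [List.count_append, Ne.symm hac]
        · simp [List.count_append, List.count_eq_zero_of_not_mem hmem]

-- insertBy unfolding and congruence machinery (sorted2 with distinct first keys = sorted by first key)
theorem pv_insertBy_cons (f : (String × Int) → (String × Int) → Bool) (x y : String × Int)
    (ys : List (String × Int)) :
    PySem.List.insertBy f x (y :: ys) =
      if f x y then x :: y :: ys else y :: PySem.List.insertBy f x ys := by
  rfl

theorem pv_insertBy_congr (f g : (String × Int) → (String × Int) → Bool) (x : String × Int) :
    ∀ (acc : List (String × Int)), (∀ y ∈ acc, f x y = g x y) →
      PySem.List.insertBy f x acc = PySem.List.insertBy g x acc := by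
  intro acc
  induction acc with
  | nil => intro _; rfl
  | cons y ys ih =>
      intro h
      rw [pv_insertBy_cons, pv_insertBy_cons, h y (by simp)]
      by_cases hg : g x y = true
      · simp [hg]
      · simp only [Bool.not_eq_true] at hg
        simp [hg, ih (fun z hz => h z (by simp [hz]))]

theorem pv_foldl_insertBy_congr (f g : (String × Int) → (String × Int) → Bool) :
    ∀ (l acc : List (String × Int)),
      (∀ x ∈ l, ∀ y, (y ∈ acc ∨ y ∈ l) → f x y = g x y) →
      l.foldl (fun a x => PySem.List.insertBy f x a) acc =
        l.foldl (fun a x => PySem.List.insertBy g x a) acc := by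
  intro l
  induction l with
  | nil => intro acc _; rfl
  | cons x xs ih =>
      intro acc h
      simp only [List.foldl_cons]
      rw [pv_insertBy_congr f g x acc (fun y hy => h x (by simp) y (Or.inl hy))]
      apply ih
      intro a ha y hy
      apply h a (by simp [ha])
      rcases hy with hy | hy
      · rcases (PySem.List.mem_insertBy g x y acc).mp hy with hy | hy
        · exact Or.inr (by simp [hy])
        · exact Or.inl hy
      · exact Or.inr (by simp [hy])

theorem pv_sorted2_eq_sorted (xs : List (String × Int)) (hnd : (xs.map Prod.fst).Nodup) :
    PySem.List.sorted2 xs (fun t => t.1) (fun t => t.2) =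
      PySem.List.sorted xs (fun t => t.1) := by
  rw [PySem.List.sorted_eq_foldl_insertBy]
  show xs.foldl (fun acc x => PySem.List.insertBy _ x acc) [] = _
  apply pv_foldl_insertBy_congr
  intro a ha y hy
  have hy : y ∈ xs := by tauto
  by_cases h1 : a.1 < y.1
  · simp [h1]
  · by_cases h2 : y.1 < a.1
    · simp [h1, h2]
    · have heq : a.1 = y.1 := le_antisymm (not_lt.mp h2) (not_lt.mp h1)
      have : a = y := List.inj_on_of_nodup_map hnd ha hy heq
      subst this
      simp

theorem pv_singleton_lt (a b : Char) (h : a < b) : String.singleton a < String.singleton b := by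
  rw [String.lt_iff_toList_lt]
  have : ([a] : List Char) < [b] := by constructor; simp [h]
  simpa using this

theorem pv_singleton_inj : Function.Injective String.singleton := by
  intro a b h
  simpa [String.singleton] using h

theorem pv_foldl_congr {α β : Type} (f g : β → α → β) (l : List α) (init : β)
    (h : ∀ st, ∀ x ∈ l, f st x = g st x) : l.foldl f init = l.foldl g init := by
  induction l generalizing init with
  | nil => rfl
  | cons x xs ih =>
      simp only [List.foldl_cons]
      rw [h init x (by simp)]
      exact ih _ (fun st y hy => h st y (by simp [hy]))

-- counts over the lowered string restricted to alphabetic characters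
theorem pv_count_filter_alpha (L : List Char) (c : Char) (hc : c ∈ pvALPHABET.toList) :
    (L.filter (fun a => decide (a ∈ pvALPHABET.toList))).count c = L.count c :=
  List.count_filter (by simpa using hc)

theorem pv_alpha_nodup : pvALPHABET.toList.Nodup := by decide

theorem pv_alpha_pairwise : pvALPHABET.toList.Pairwise (· < ·) := by decide

-- ===== VERDICT (by name: the statement is the Claim_ definition above) =====
theorem summarize_letters_spec : Claim_equal_summarize_letters := by
  intro string _
  unfold Spec_summarize_letters summarize_letters summarize_letters_alt
  simp only []
  -- names
  set L : List Char := (PySem.Str.lower string).toList with hL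
  -- Step 1: A's loop = filtered fold of pvStep
  have hstep :
      L.foldl
        (fun (st : List Char × List Int) letter =>
          if PySem.Str.isIn (String.singleton letter) pvALPHABET then
            if letter ∈ st.1 then
              (st.1, PySem.List.pySetD st.2 (((PySem.List.index? st.1 letter).getD 0 : Nat) : Int)
                (PySem.List.pyGetD st.2 (((PySem.List.index? st.1 letter).getD 0 : Nat) : Int) 0 + 1))
            else (st.1 ++ [letter], st.2 ++ [1])
          else st) ([], []) =
      (L.filter (fun a => decide (a ∈ pvALPHABET.toList))).foldl pvStep ([], []) := by
    rw [List.foldl_filter]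
    apply pv_foldl_congr
    intro st c _
    by_cases hal : c ∈ pvALPHABET.toList
    · have hal' : (decide (c ∈ pvALPHABET.toList)) = true := by simpa using hal
      rw [if_pos ((pv_isIn_singleton c pvALPHABET).mpr hal), if_pos hal']
      unfold pvStep
      by_cases hmem : c ∈ st.1
      · rw [if_pos hmem]
        rw [PySem.List.index?_eq_idxOf?, pv_idxOf?_getD _ _ hmem]
        rw [PySem.List.pySetD_natCast, PySem.List.pyGetD_natCast]
        simp [hmem]
      · rw [if_neg hmem]
        simp [hmem]
    · have hal' : ¬ ((decide (c ∈ pvALPHABET.toList)) = true) := by simpa using hal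
      have hisin : ¬ (PySem.Str.isIn (String.singleton c) pvALPHABET = true) :=
        fun h => hal ((pv_isIn_singleton c pvALPHABET).mp h)
      rw [if_neg hisin, if_neg hal']
  rw [hstep, pv_loop]
  set F : List Char := L.filter (fun a => decide (a ∈ pvALPHABET.toList)) with hF
  set S : List Char := PySem.Set.ofList F with hS
  -- tuples as a single map over S
  have hzip : S.zip (S.map (fun a => (F.count a : Int))) =
      S.map (fun a => (a, (F.count a : Int))) := by
    simpa using (@List.zip_map' Char Char Int id (fun a => (F.count a : Int)) S)
  simp only [hzip, List.map_map]
  -- B's loop as filter+map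
  rw [PySem.List.foldl_append_ite]
  simp only [List.nil_append]
  -- the count of a single letter in the lowered string
  have hcnt : ∀ c : Char,
      (PySem.Str.count (PySem.Str.lower string) (String.singleton c) : Int) = (L.count c : Int) := by
    intro c
    rw [PySem.Str.count_eq]
    simp [pv_count_singleton, hL]
  simp only [hcnt]
  -- rewrite A's tuples to count over L as well
  have hmemS : ∀ a ∈ S, a ∈ L ∧ a ∈ pvALPHABET.toList := by
    intro a ha
    have : a ∈ F := (PySem.Set.mem_ofList _ _).mp (hS ▸ ha)
    rw [hF, List.mem_filter] at this
    exact ⟨this.1, by simpa using this.2⟩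
  have htup : S.map ((fun p : Char × Int => (String.singleton p.1, p.2)) ∘
        (fun a => (a, (F.count a : Int)))) =
      S.map (fun a => (String.singleton a, (L.count a : Int))) := by
    apply List.map_congr_left
    intro a ha
    simp only [Function.comp]
    rw [hF, pv_count_filter_alpha L a (hmemS a ha).2]
  rw [htup]
  -- both sides are maps of the same function over permuted nodup char lists
  have hSnd : S.Nodup := hS ▸ PySem.Set.nodup_ofList F
  have hAFnd : (pvALPHABET.toList.filter (fun c => decide (0 < (L.count c : Int)))).Nodup :=
    pv_alpha_nodup.filter _
  have hperm : (pvALPHABET.toList.filter (fun c => decide (0 < (L.count c : Int)))).Perm S := by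
    rw [List.perm_ext_iff_of_nodup hAFnd hSnd]
    intro a
    rw [List.mem_filter]
    constructor
    · rintro ⟨hal, hpos⟩
      have haL : a ∈ L := List.count_pos_iff.mp (by exact_mod_cast of_decide_eq_true hpos)
      rw [hS, PySem.Set.mem_ofList, hF, List.mem_filter]
      exact ⟨haL, by simpa using hal⟩
    · intro ha
      obtain ⟨haL, hal⟩ := hmemS a ha
      refine ⟨hal, decide_eq_true ?_⟩
      exact_mod_cast List.count_pos_iff.mpr haL
  have hpairAF : (pvALPHABET.toList.filter (fun c => decide (0 < (L.count c : Int)))).Pairwise (· < ·) :=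
    pv_alpha_pairwise.filter _
  -- conclude: A's sort of the tuples is exactly B's alphabet-ordered list
  have hnd' : ((S.map (fun a => (String.singleton a, (L.count a : Int)))).map Prod.fst).Nodup := by
    rw [List.map_map]
    exact (hSnd).map (fun a b h => pv_singleton_inj (h : String.singleton a = String.singleton b))
  rw [pv_sorted2_eq_sorted _ hnd']
  apply PySem.List.sorted_eq_of_perm_of_pairwise_lt
  · exact hperm.map _
  · rw [List.pairwise_map]
    exact hpairAF.imp (fun h => pv_singleton_lt _ _ h)
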